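-- pv_equiv track=rewrite | github.com/HQLouis/langgraph-learning | tests/feature-testing/reporting/matrix_report.py | _build_head
-- ===== SOURCE A (Python) =====
-- def _build_head(requirements_in_order: list[tuple[str, str]]) -> str:
--     """Two header rows: Eigenschaft groups, then the individual requirement IDs."""
--     groups: list[tuple[str, int]] = []
--     current_group: str | None = None
--     current_span = 0
--     for _, eig_title in requirements_in_order:
--         if eig_title != current_group:
--             if current_group is not None:
--                 groups.append((current_group, current_span))
--             current_group = eig_title
--             current_span = 1
--         else:
--             current_span += 1
--     if current_group is not None:
--         groups.append((current_group, current_span))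
--
--     group_cells = "".join(
--         f'<th class="group" colspan="{span}">{_esc(title)}</th>'
--         for title, span in groups
--     )
--     req_cells = "".join(
--         f'<th title="{_esc(eig_title)}">{_esc(req_id)}</th>'
--         for req_id, eig_title in requirements_in_order
--     )
--     return (
--         f'<thead>'
--         f'<tr><th class="corner" rowspan="2">SubExample ↓ / Requirement →</th>{group_cells}<th rowspan="2">row</th></tr>'
--         f'<tr>{req_cells}</tr>'
--         f'</thead>'
--     )
--
-- def _esc(s: str) -> str:
--     return (
--         (s or "").replace("&", "&amp;").replace("<", "&lt;").replace(">", "&gt;")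
--         .replace('"', "&quot;")
--     )
-- ===== SOURCE B (Python) =====
-- def _esc(s: str) -> str:
--     return (
--         (s or "").replace("&", "&amp;").replace("<", "&lt;").replace(">", "&gt;")
--         .replace('"', "&quot;")
--     )
--
--
-- def _build_head(requirements_in_order: list[tuple[str, str]]) -> str:
--     """Two header rows: Eigenschaft groups, then the individual requirement IDs."""
--     titles = [t for _, t in requirements_in_order]
--     n = len(titles)
--     # indices where a new group begins; colspan = distance to the next boundary
--     starts = [i for i in range(n) if i == 0 or titles[i] != titles[i - 1]]
--     group_cells = "".join(
--         f'<th class="group" colspan="{e - s}">{_esc(titles[s])}</th>'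
--         for s, e in zip(starts, starts[1:] + [n])
--     )
--     req_cells = "".join(
--         f'<th title="{_esc(t)}">{_esc(req_id)}</th>'
--         for req_id, t in requirements_in_order
--     )
--     return (
--         f'<thead>'
--         f'<tr><th class="corner" rowspan="2">SubExample ↓ / Requirement →</th>{group_cells}<th rowspan="2">row</th></tr>'
--         f'<tr>{req_cells}</tr>'
--         f'</thead>'
--     )
-- ===== Notes on version B (the rewrite author's own statement) =====
-- stated objective: alternative
-- what changed: Instead of A's run-length accumulator loop (current_group/current_span with an end-of-loop flush), B computes the list of boundary indices where a new title run starts and derives each colspan as the difference of adjacent boundaries via zip(starts, starts[1:]+[n]); columns are never grouped into runs at all.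
import Mathlib
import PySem

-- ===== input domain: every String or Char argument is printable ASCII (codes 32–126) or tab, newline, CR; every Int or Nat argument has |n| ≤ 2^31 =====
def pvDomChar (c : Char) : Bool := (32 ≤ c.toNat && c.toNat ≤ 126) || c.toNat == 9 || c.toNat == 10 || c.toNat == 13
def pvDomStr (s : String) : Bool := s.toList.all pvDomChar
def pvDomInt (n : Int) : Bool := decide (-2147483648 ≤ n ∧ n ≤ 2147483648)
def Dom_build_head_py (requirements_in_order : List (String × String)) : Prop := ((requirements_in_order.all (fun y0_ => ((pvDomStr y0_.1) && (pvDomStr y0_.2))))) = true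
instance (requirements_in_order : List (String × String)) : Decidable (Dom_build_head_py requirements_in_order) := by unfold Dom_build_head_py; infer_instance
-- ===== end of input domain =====

-- B replaces A's run-length accumulator loop by index arithmetic: it collects the boundary
-- indices where a new title run starts and derives each colspan as the difference of adjacent
-- boundaries; equal return values, alternative decomposition.

-- shared helper: the module's _esc (identical in both sources); '(s or "")' equals s for strings
def pyEsc (s : String) : String :=
  PySem.Str.replace
    (PySem.Str.replace
      (PySem.Str.replace
        (PySem.Str.replace s "&" "&amp;")
        "<" "&lt;")
      ">" "&gt;")
    "\"" "&quot;"

-- shared helper: the req-cells join (identical f-string in both sources)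
def reqCells (requirements_in_order : List (String × String)) : String :=
  requirements_in_order.foldl
    (fun acc p =>
      acc ++ ("<th title=\"" ++ pyEsc p.2 ++ "\">" ++ pyEsc p.1 ++ "</th>"))
    ""

-- ===== PORT A =====
-- A's group-cells join over its (title, span) list
def groupCells (groups : List (String × Int)) : String :=
  groups.foldl
    (fun acc g =>
      acc ++ ("<th class=\"group\" colspan=\"" ++ PySem.Int.toStr g.2 ++ "\">" ++ pyEsc g.1 ++ "</th>"))
    ""

-- the body of A's for-loop over (groups, current_group, current_span)
def aStep (st : List (String × Int) × Option String × Int) (p : String × String) :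
    List (String × Int) × Option String × Int :=
  if some p.2 ≠ st.2.1 then
    ((match st.2.1 with
      | some c => st.1 ++ [(c, st.2.2)]
      | none => st.1), some p.2, 1)
  else (st.1, st.2.1, st.2.2 + 1)

-- the final 'if current_group is not None' flush
def aFlush (st : List (String × Int) × Option String × Int) : List (String × Int) :=
  match st.2.1 with
  | some c => st.1 ++ [(c, st.2.2)]
  | none => st.1

-- A's loop followed by the flush
def aGroups (requirements_in_order : List (String × String)) : List (String × Int) :=
  aFlush (requirements_in_order.foldl aStep ([], none, 0))

def build_head_py (requirements_in_order : List (String × String)) : String :=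
  "<thead><tr><th class=\"corner\" rowspan=\"2\">SubExample ↓ / Requirement →</th>"
    ++ groupCells (aGroups requirements_in_order)
    ++ "<th rowspan=\"2\">row</th></tr><tr>"
    ++ reqCells requirements_in_order ++ "</tr></thead>"

-- ===== PORT B =====
-- Source B: titles, the boundary indices 'starts', then colspans as differences of adjacent
-- boundaries via zip(starts, starts[1:] + [n])
def build_head_py_alt (requirements_in_order : List (String × String)) : String :=
  let titles := requirements_in_order.map Prod.snd
  let n := titles.length
  let starts := (List.range n).filter
    (fun i => i == 0 || titles.getD i "" != titles.getD (i - 1) "")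
  let group_cells := (starts.zip (starts.drop 1 ++ [n])).foldl
    (fun acc se =>
      acc ++ ("<th class=\"group\" colspan=\"" ++ PySem.Int.toStr ((se.2 : Int) - (se.1 : Int))
        ++ "\">" ++ pyEsc (titles.getD se.1 "") ++ "</th>"))
    ""
  "<thead><tr><th class=\"corner\" rowspan=\"2\">SubExample ↓ / Requirement →</th>"
    ++ group_cells
    ++ "<th rowspan=\"2\">row</th></tr><tr>"
    ++ reqCells requirements_in_order ++ "</tr></thead>"

-- ===== PRECONDITION & SPEC =====
def Spec_build_head_py (requirements_in_order : List (String × String)) (out : String) : Prop := out = build_head_py_alt requirements_in_order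
instance (requirements_in_order : List (String × String)) (out : String) : Decidable (Spec_build_head_py requirements_in_order out) := by unfold Spec_build_head_py; infer_instance

-- ===== CLAIM (what is proved, stated in full; the proofs are below) =====
def Claim_equal_build_head_py : Prop := ∀ (requirements_in_order : List (String × String)), Dom_build_head_py requirements_in_order → Spec_build_head_py requirements_in_order (build_head_py requirements_in_order)

-- ===== LEMMAS AND PROOFS =====

-- canonical run list of a title list: (title, length) of each maximal run, recursively
def runsT : List String → List (String × Int)
  | [] => []
  | t :: rest =>
    (t, 1 + ((rest.takeWhile (fun x => x == t)).length : Int))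
      :: runsT (rest.dropWhile (fun x => x == t))
termination_by l => l.length
decreasing_by
  exact Nat.lt_succ_of_le (List.length_dropWhile_le _ _)

-- run list over the pairs, keyed by the second component (A's groups, recursively)
def pairRuns : List (String × String) → List (String × Int)
  | [] => []
  | (_, t) :: rest =>
    let sp := rest.span (fun p => p.2 == t)
    (t, 1 + (sp.1.length : Int)) :: pairRuns sp.2
termination_by l => l.length
decreasing_by
  simp only [List.span_eq_takeWhile_dropWhile]
  exact Nat.lt_succ_of_le (List.length_dropWhile_le _ _)

-- B's boundary predicate, boundary list and (title, colspan) list, abstracted from its port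
def bPred (titles : List String) (i : Nat) : Bool :=
  i == 0 || titles.getD i "" != titles.getD (i - 1) ""

def bStarts (titles : List String) : List Nat :=
  (List.range titles.length).filter (bPred titles)

def bGroupsT (titles : List String) : List (String × Int) :=
  ((bStarts titles).zip ((bStarts titles).drop 1 ++ [titles.length])).map
    (fun se => (titles.getD se.1 "", (se.2 : Int) - (se.1 : Int)))

-- A's loop from a running state (groups, some c, s) equals groups ++ the runs, where the
-- current run (c, s) is extended by the longest prefix of xs with title c.
theorem aLoop_eq_runs (xs : List (String × String)) :
    ∀ (groups : List (String × Int)) (c : String) (s : Int),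
      aFlush (xs.foldl aStep (groups, some c, s))
      = groups ++ (c, s + ((xs.span (fun p => p.2 == c)).1.length : Int))
          :: pairRuns (xs.span (fun p => p.2 == c)).2 := by
  induction xs with
  | nil =>
    intro groups c s
    simp [List.span_eq_takeWhile_dropWhile, pairRuns, aFlush]
  | cons p rest ih =>
    intro groups c s
    by_cases h : p.2 = c
    · have hstep : aStep (groups, some c, s) p = (groups, some c, s + 1) := by
        simp [aStep, h]
      have hspan : ((p :: rest).span (fun q => q.2 == c)) =
          (p :: (rest.span (fun q => q.2 == c)).1, (rest.span (fun q => q.2 == c)).2) := by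
        simp [List.span_eq_takeWhile_dropWhile, h]
      rw [List.foldl_cons, hstep, ih, hspan]
      simp only [List.length_cons]
      push_cast
      ring_nf
    · have hstep : aStep (groups, some c, s) p = (groups ++ [(c, s)], some p.2, 1) := by
        simp [aStep, h]
      have hspan : ((p :: rest).span (fun q => q.2 == c)) = ([], p :: rest) := by
        simp [List.span_eq_takeWhile_dropWhile, h]
      rw [List.foldl_cons, hstep, ih, hspan]
      have : pairRuns (p :: rest) =
          (p.2, 1 + ((rest.span (fun q => q.2 == p.2)).1.length : Int))
            :: pairRuns (rest.span (fun q => q.2 == p.2)).2 := by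
        conv_lhs => rw [pairRuns.eq_def]
      simp [this, List.append_assoc]

theorem aGroups_eq_pairRuns (xs : List (String × String)) : aGroups xs = pairRuns xs := by
  cases xs with
  | nil => simp [aGroups, aFlush, pairRuns]
  | cons p rest =>
    have hstep : aStep (([] : List (String × Int)), (none : Option String), (0 : Int)) p
        = ([], some p.2, 1) := by simp [aStep]
    have h := aLoop_eq_runs rest [] p.2 1
    unfold aGroups
    rw [List.foldl_cons, hstep, h]
    conv_rhs => rw [pairRuns.eq_def]
    simp

theorem pairRuns_eq_runsT (xs : List (String × String)) :
    pairRuns xs = runsT (xs.map Prod.snd) := by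
  induction xs using pairRuns.induct with
  | case1 => simp [pairRuns, runsT]
  | case2 r t rest sp ih =>
    simp only [sp, List.span_eq_takeWhile_dropWhile] at ih
    rw [pairRuns.eq_def]
    simp only [List.map_cons]
    rw [runsT.eq_def]
    simp only [List.span_eq_takeWhile_dropWhile, List.takeWhile_map,
      List.dropWhile_map, Function.comp_def, List.length_map]
    rw [← ih]

-- (range k).filter (· == 0) = [0] for k ≥ 1
theorem filter_range_zero (k : Nat) (hk : 1 ≤ k) :
    (List.range k).filter (fun i => i == 0) = [0] := by
  induction k with
  | zero => omega
  | succ j ih =>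
    rw [List.range_succ, List.filter_append]
    rcases Nat.eq_zero_or_pos j with hj | hj
    · subst hj
      simp
    · rw [ih hj]
      have hne : j ≠ 0 := by omega
      simp [hne]

-- B's boundary list of (replicate k t ++ v): the single boundary 0 in the run, then
-- v's boundaries shifted by k — provided v does not continue the run.
theorem bStarts_replicate_append (k : Nat) (t : String) (v : List String) (hk : 1 ≤ k)
    (hv : ∀ x, v.head? = some x → (x == t) = false) :
    bStarts (List.replicate k t ++ v) = 0 :: (bStarts v).map (fun j => k + j) := by
  have hlen : (List.replicate k t ++ v).length = k + v.length := by simp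
  unfold bStarts
  rw [hlen, List.range_add, List.filter_append]
  have h1 : (List.range k).filter (bPred (List.replicate k t ++ v))
      = (List.range k).filter (fun i => i == 0) := by
    apply List.filter_congr
    intro i hi
    have hik : i < k := List.mem_range.mp hi
    cases i with
    | zero => simp [bPred]
    | succ j =>
      have hgi : (List.replicate k t ++ v).getD (j + 1) "" = t := by
        rw [List.getD_append _ _ _ _ (by simpa using hik), List.getD_replicate _ hik]
      have hgj : (List.replicate k t ++ v).getD (j + 1 - 1) "" = t := by
        simp only [Nat.add_sub_cancel]
        rw [List.getD_append _ _ _ _ (by simp; omega), List.getD_replicate _ (by omega)]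
      simp only [bPred]
      rw [hgi, hgj]
      simp
  have h2 : ((List.range v.length).map (fun x => k + x)).filter
        (bPred (List.replicate k t ++ v))
      = ((List.range v.length).filter (bPred v)).map (fun j => k + j) := by
    rw [List.filter_map]
    congr 1
    apply List.filter_congr
    intro j hj
    have hjm : j < v.length := List.mem_range.mp hj
    have hget : ∀ a, a < v.length → (List.replicate k t ++ v).getD (k + a) "" = v.getD a "" := by
      intro a _
      rw [List.getD_append_right _ _ _ _ (by simp)]
      simp
    cases j with
    | zero =>
      have hk0 : ((k + 0 : Nat) == 0) = false := by simp; omega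
      have hgm1 : (List.replicate k t ++ v).getD (k + 0 - 1) "" = t := by
        rw [List.getD_append _ _ _ _ (by simp; omega), List.getD_replicate _ (by omega)]
      obtain ⟨x, hx⟩ : ∃ x, v.head? = some x := by
        cases v with
        | nil => simp at hjm
        | cons a w => exact ⟨a, rfl⟩
      have hxv : v.getD 0 "" = x := by
        cases v with
        | nil => simp at hx
        | cons a w =>
          have : a = x := by simpa using hx
          simp [this]
      have hbne : (x != t) = true := by
        simp only [bne, hv x hx]
        rfl
      simp only [Function.comp_apply, bPred, hk0]
      rw [hget 0 hjm, hgm1, hxv, hbne]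
      simp
    | succ s =>
      have hpred : k + (s + 1) - 1 = k + s := by omega
      simp only [Function.comp_apply, bPred, hpred, Nat.add_sub_cancel]
      rw [hget (s + 1) hjm, hget s (by omega)]
      have hk0 : ((k + (s + 1) : Nat) == 0) = false := by simp
      have hs0 : ((s + 1 : Nat) == 0) = false := by simp
      rw [hk0, hs0]
  rw [h1, h2, filter_range_zero k hk]
  simp

-- nonempty v: B's boundary list starts with 0
theorem bStarts_cons (x : String) (w : List String) :
    ∃ tl, bStarts (x :: w) = 0 :: tl := by
  refine ⟨((List.range w.length).map Nat.succ).filter (bPred (x :: w)), ?_⟩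
  unfold bStarts
  rw [List.length_cons, List.range_succ_eq_map, List.filter_cons]
  have h0 : bPred (x :: w) 0 = true := by simp [bPred]
  rw [h0]
  simp

-- the key step: B's (title, colspan) list peels one whole run at a time
theorem bGroupsT_replicate_append (k : Nat) (t : String) (v : List String) (hk : 1 ≤ k)
    (hv : ∀ x, v.head? = some x → (x == t) = false) :
    bGroupsT (List.replicate k t ++ v) = (t, (k : Int)) :: bGroupsT v := by
  have hS := bStarts_replicate_append k t v hk hv
  have hlen : (List.replicate k t ++ v).length = k + v.length := by simp
  have hget0 : (List.replicate k t ++ v).getD 0 "" = t := by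
    rw [List.getD_append _ _ _ _ (by simp; omega), List.getD_replicate _ (by omega)]
  have hget : ∀ a, (List.replicate k t ++ v).getD (k + a) "" = v.getD a "" := by
    intro a
    rw [List.getD_append_right _ _ _ _ (by simp)]
    simp
  cases v with
  | nil =>
    unfold bGroupsT
    rw [hS, hlen]
    simp only [bStarts, List.length_nil, List.range_zero, List.filter_nil, List.map_nil,
      List.drop_succ_cons, List.drop_nil, List.nil_append, List.zip_nil_right,
      List.zip_cons_cons, List.zip_nil_left, List.map_cons, Nat.add_zero]
    rw [hget0]
    norm_num
  | cons x w =>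
    obtain ⟨tl, htl⟩ := bStarts_cons x w
    unfold bGroupsT
    rw [hS, htl, hlen]
    simp only [List.map_cons, Nat.add_zero, List.drop_succ_cons, List.drop_zero,
      List.length_cons]
    rw [List.cons_append, List.zip_cons_cons]
    rw [show (List.map (fun j => k + j) tl ++ [k + (w.length + 1)])
        = List.map (fun j => k + j) (tl ++ [w.length + 1]) by simp]
    rw [show (k :: List.map (fun j => k + j) tl) = List.map (fun j => k + j) (0 :: tl) by simp]
    rw [List.zip_map, List.map_cons, List.map_map]
    have hhd : ((List.replicate k t ++ x :: w).getD 0 "", ((k : Nat) : Int) - ((0 : Nat) : Int))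
        = (t, (k : Int)) := by
      rw [hget0]
      norm_num
    rw [hhd]
    congr 1
    apply List.map_congr_left
    intro se _
    simp only [Function.comp_apply, Prod.map]
    rw [hget se.1]
    refine Prod.ext rfl ?_
    push_cast
    ring

-- B's boundary-difference groups equal the canonical runs
theorem bGroupsT_eq_runsT (titles : List String) : bGroupsT titles = runsT titles := by
  induction titles using runsT.induct with
  | case1 => simp [bGroupsT, bStarts, runsT]
  | case2 t rest ih =>
    have hu : rest.takeWhile (fun x => x == t)
        = List.replicate (rest.takeWhile (fun x => x == t)).length t := by
      rw [List.eq_replicate_length]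
      intro b hb
      have hbt : (b == t) = true := List.mem_takeWhile_imp (p := fun x => x == t) hb
      exact eq_of_beq hbt
    have hdecomp : t :: rest
        = List.replicate ((rest.takeWhile (fun x => x == t)).length + 1) t
            ++ rest.dropWhile (fun x => x == t) := by
      conv_lhs => rw [show rest = rest.takeWhile (fun x => x == t)
        ++ rest.dropWhile (fun x => x == t) from (List.takeWhile_append_dropWhile ..).symm]
      rw [show (rest.takeWhile (fun x => x == t)).length + 1
          = 1 + (rest.takeWhile (fun x => x == t)).length by omega]
      rw [List.replicate_add, List.replicate_one]
      conv_lhs => rw [hu]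
      simp
    have hv : ∀ x, (rest.dropWhile (fun x => x == t)).head? = some x → (x == t) = false := by
      intro x hx
      have hnd := List.head?_dropWhile_not (fun x => x == t) rest
      rw [hx] at hnd
      exact hnd
    rw [hdecomp, bGroupsT_replicate_append _ _ _ (by omega) hv, ih, ← hdecomp]
    conv_rhs => rw [runsT.eq_def]
    have hcast : (((rest.takeWhile (fun x => x == t)).length + 1 : Nat) : Int)
        = 1 + ((rest.takeWhile (fun x => x == t)).length : Int) := by
      push_cast
      ring
    rw [hcast]

-- ===== VERDICT (by name: the statement is the Claim_ definition above) =====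
theorem build_head_py_spec : Claim_equal_build_head_py := by
  intro xs _
  unfold Spec_build_head_py build_head_py build_head_py_alt
  have hfold : ((bStarts (xs.map Prod.snd)).zip
        ((bStarts (xs.map Prod.snd)).drop 1 ++ [(xs.map Prod.snd).length])).foldl
      (fun acc se =>
        acc ++ ("<th class=\"group\" colspan=\"" ++ PySem.Int.toStr ((se.2 : Int) - (se.1 : Int))
          ++ "\">" ++ pyEsc ((xs.map Prod.snd).getD se.1 "") ++ "</th>")) ""
      = groupCells (bGroupsT (xs.map Prod.snd)) := by
    unfold bGroupsT groupCells
    rw [List.foldl_map]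
  rw [aGroups_eq_pairRuns, pairRuns_eq_runsT, ← bGroupsT_eq_runsT, ← hfold]
  rfl
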